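-- pv_equiv track=rewrite | github.com/lukJZu/advent-of-code | 2025/2/run2.py | is_int_repeated
-- ===== SOURCE A (Python) =====
-- def is_int_repeated(n: int) -> bool:
--     n_str = str(n)
--
--     n_len = len(n_str)
--     for j in range(1, int(n_len/2)+1):
--         if n_len % j:
--             continue
--
--         # spliting string into equal chunks
--         split_idx = int(n_len / j)
--
--         chunks = [n_str[(i*j):((i+1)*j)] for i in range(0, split_idx)]
--
--         if len(set(chunks)) == 1:
--             return True
--
--     return False
-- ===== SOURCE B (Python) =====
-- def is_int_repeated(n: int) -> bool:
--     s = str(n)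
--     return s in (s + s)[1:-1]
-- ===== Notes on version B (the rewrite author's own statement) =====
-- stated objective: idiomatic
-- what changed: Replaces the divisor loop with chunk-set comparison by the classic string-doubling test: s has a nontrivial repeating period iff s occurs in (s+s)[1:-1].
import Mathlib
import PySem

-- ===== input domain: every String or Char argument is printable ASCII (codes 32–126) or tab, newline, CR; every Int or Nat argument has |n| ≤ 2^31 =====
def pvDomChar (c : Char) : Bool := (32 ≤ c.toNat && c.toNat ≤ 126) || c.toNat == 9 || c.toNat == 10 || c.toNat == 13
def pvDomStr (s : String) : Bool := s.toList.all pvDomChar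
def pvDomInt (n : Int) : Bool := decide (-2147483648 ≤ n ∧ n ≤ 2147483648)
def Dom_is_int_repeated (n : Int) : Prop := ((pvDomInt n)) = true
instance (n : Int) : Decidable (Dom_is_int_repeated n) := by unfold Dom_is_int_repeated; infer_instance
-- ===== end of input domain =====

-- B replaces A's divisor loop with chunk sets by the classic string-doubling test:
-- str(n) has a nontrivial repeating period iff it occurs inside (str(n)+str(n))[1:-1].

-- ===== PORT A =====
def is_int_repeated (n : Int) : Bool :=
  let n_str := PySem.Int.toChars n
  let n_len : Int := n_str.length
  (PySem.List.pyRange 1 (PySem.Int.truncdiv n_len 2 + 1) 1).any (fun j =>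
    if PySem.Int.mod n_len j ≠ 0 then false
    else
      let split_idx := PySem.Int.truncdiv n_len j
      let chunks := (PySem.List.pyRange 0 split_idx 1).map
        (fun i => PySem.List.slice n_str (some (i * j)) (some ((i + 1) * j)))
      (PySem.Set.ofList chunks).length == 1)

-- ===== PORT B =====
def is_int_repeated_alt (n : Int) : Bool :=
  let s := PySem.Int.toChars n
  PySem.Chars.isIn s (PySem.List.slice (s ++ s) (some 1) (some (-1)))

-- ===== PRECONDITION & SPEC =====
def Spec_is_int_repeated (n : Int) (out : Bool) : Prop := out = is_int_repeated_alt n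
instance (n : Int) (out : Bool) : Decidable (Spec_is_int_repeated n out) := by unfold Spec_is_int_repeated; infer_instance

-- ===== CLAIM (what is proved, stated in full; the proofs are below) =====
def Claim_equal_is_int_repeated : Prop := ∀ (n : Int), Dom_is_int_repeated n → Spec_is_int_repeated n (is_int_repeated n)

-- ===== LEMMAS AND PROOFS =====

-- `l` repeats with period `j`: every entry equals the entry at its index mod `j`
def pvBase (l : List Char) (j : ℕ) : Prop := ∀ a, a < l.length → l[a]? = l[a % j]?

-- cyclic shift by `k` fixes `l` (index form of `l.rotate k = l`)
def pvCyc (l : List Char) (k : ℕ) : Prop := ∀ i, i < l.length → l[(i + k) % l.length]? = l[i]?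

lemma pvCyc_add {l : List Char} {k m : ℕ} (hk : pvCyc l k) (hm : pvCyc l m) : pvCyc l (k + m) := by
  intro i hi
  have h1 : (i + k) % l.length < l.length := Nat.mod_lt _ (by omega)
  have e1 : (i + (k + m)) % l.length = ((i + k) % l.length + m) % l.length := by
    rw [Nat.mod_add_mod, Nat.add_assoc]
  rw [e1, hm _ h1, hk _ hi]

lemma pvCyc_zero (l : List Char) : pvCyc l 0 := by
  intro i hi
  rw [Nat.add_zero, Nat.mod_eq_of_lt hi]

lemma pvCyc_mul {l : List Char} {k : ℕ} (hk : pvCyc l k) (u : ℕ) : pvCyc l (u * k) := by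
  induction u with
  | zero => simpa using pvCyc_zero l
  | succ v ih => have := pvCyc_add ih hk; simpa [Nat.succ_mul] using this

lemma pvCyc_mod {l : List Char} {k : ℕ} (hk : pvCyc l k) : pvCyc l (k % l.length) := by
  intro i hi
  have : (i + k % l.length) % l.length = (i + k) % l.length := by
    conv_lhs => rw [Nat.add_mod, Nat.mod_mod_of_dvd _ dvd_rfl]
    rw [← Nat.add_mod]
  rw [this, hk _ hi]

lemma pvBezout (k L : ℕ) (hL : 0 < L) : ∃ u : ℕ, (u * k) % L = Nat.gcd k L % L := by
  obtain ⟨a, b, hab⟩ : ∃ a b : ℤ, (Nat.gcd k L : ℤ) = a * k + b * L :=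
    ⟨Nat.gcdA k L, Nat.gcdB k L, by rw [Nat.gcd_eq_gcd_ab]; ring⟩
  refine ⟨(a % L).toNat, ?_⟩
  have hLZ : (0:ℤ) < L := by exact_mod_cast hL
  have h0 : (0:ℤ) ≤ a % L := Int.emod_nonneg a (by omega)
  have : ((((a % L).toNat * k) % L : ℕ) : ℤ) = ((Nat.gcd k L % L : ℕ) : ℤ) := by
    push_cast
    rw [Int.toNat_of_nonneg h0]
    conv_lhs => rw [Int.mul_emod, Int.emod_emod_of_dvd _ dvd_rfl, ← Int.mul_emod]
    rw [hab]
    have : (a * k + b * L) % L = (a * k) % L := by simp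
    rw [this]
  exact_mod_cast this

lemma pvLin_of_cyc {l : List Char} {j : ℕ} (h : pvCyc l j) :
    ∀ i, i + j < l.length → l[i + j]? = l[i]? := by
  intro i hij
  have := h i (by omega)
  rwa [Nat.mod_eq_of_lt hij] at this

lemma pvBase_of_lin {l : List Char} {j : ℕ} (hj : 0 < j)
    (h : ∀ i, i + j < l.length → l[i + j]? = l[i]?) : pvBase l j := by
  intro a
  induction a using Nat.strong_induction_on with
  | _ a ih =>
    intro ha
    by_cases hlt : a < j
    · rw [Nat.mod_eq_of_lt hlt]
    · obtain ⟨b, rfl⟩ : ∃ b, a = b + j := ⟨a - j, by omega⟩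
      rw [h b (by omega), ih b (by omega) (by omega), Nat.add_mod_right]

lemma pvCyc_of_base {l : List Char} {j : ℕ} (hd : j ∣ l.length) (h : pvBase l j) : pvCyc l j := by
  intro i hi
  have h1 : (i + j) % l.length < l.length := Nat.mod_lt _ (by omega)
  rw [h _ h1, h _ hi, Nat.mod_mod_of_dvd _ hd, Nat.add_mod_right]

lemma pvRotate_iff_cyc {l : List Char} {k : ℕ} : l.rotate k = l ↔ pvCyc l k := by
  constructor
  · intro hr i hi
    have := List.getElem?_rotate (l := l) (n := k) (m := i) hi
    rw [hr] at this
    exact this.symm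
  · intro hc
    apply List.ext_getElem?
    intro i
    by_cases hi : i < l.length
    · rw [List.getElem?_rotate hi, hc _ hi]
    · rw [List.getElem?_eq_none (by simpa using Nat.le_of_not_lt hi),
        List.getElem?_eq_none (by omega)]

lemma pvChunks_iff_base {l : List Char} {j : ℕ} (hj : 0 < j) (hd : j ∣ l.length) :
    (∀ i, i < l.length / j → (l.drop (i * j)).take j = l.take j) ↔ pvBase l j := by
  obtain ⟨m, hm⟩ := hd
  constructor
  · intro hc a ha
    have hq : a / j < m := by
      have := Nat.div_lt_div_of_lt_of_dvd (a := a) (b := j * m) ⟨m, rfl⟩ (hm ▸ ha)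
      simpa [Nat.mul_div_cancel_left _ hj] using this
    have h1 := hc (a / j) (by rw [hm, Nat.mul_div_cancel_left _ hj]; exact hq)
    have h2 := congrArg (fun t => t[a % j]?) h1
    simp only [List.getElem?_take, List.getElem?_drop] at h2
    rw [if_pos (Nat.mod_lt _ hj), if_pos (Nat.mod_lt _ hj)] at h2
    rw [Nat.div_add_mod' a j] at h2
    exact h2
  · intro hb i hi
    apply List.ext_getElem?
    intro t
    simp only [List.getElem?_take, List.getElem?_drop]
    by_cases ht : t < j
    · rw [if_pos ht, if_pos ht]
      have hiL : i * j + t < l.length := by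
        have : i * j + j ≤ l.length := by
          rw [hm]
          have : i + 1 ≤ m := by
            rw [hm, Nat.mul_div_cancel_left _ hj] at hi; omega
          calc i * j + j = (i+1) * j := by ring
          _ ≤ m * j := Nat.mul_le_mul_right _ this
          _ = j * m := by ring
        omega
      rw [hb _ hiL, hb t (by omega)]
      congr 1
      rw [Nat.add_comm, Nat.add_mul_mod_self_right, Nat.mod_eq_of_lt ht]
    · rw [if_neg ht, if_neg ht]

lemma pvSetLen_one_iff (xs : List (List Char)) (hne : xs ≠ []) :
    ((PySem.Set.ofList xs).length = 1 ↔ ∀ x ∈ xs, ∀ y ∈ xs, x = y) := by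
  constructor
  · intro h1 x hx y hy
    obtain ⟨a, ha⟩ : ∃ a, PySem.Set.ofList xs = [a] := by
      match hs : PySem.Set.ofList xs, h1 with
      | [a], _ => exact ⟨a, rfl⟩
    have hxa : x ∈ ([a] : List (List Char)) := ha ▸ (PySem.Set.mem_ofList xs x).mpr hx
    have hya : y ∈ ([a] : List (List Char)) := ha ▸ (PySem.Set.mem_ofList xs y).mpr hy
    simp at hxa hya; rw [hxa, hya]
  · intro hall
    obtain ⟨x, t, rfl⟩ : ∃ x t, xs = x :: t := by
      cases xs with
      | nil => exact absurd rfl hne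
      | cons x t => exact ⟨x, t, rfl⟩
    have : ∀ y ∈ t, y = x := fun y hy => hall y (by simp [hy]) x (by simp)
    have hrep : x :: t = List.replicate (t.length + 1) x := by
      rw [List.eq_replicate_iff]
      refine ⟨by simp, ?_⟩
      intro b hb
      rcases List.mem_cons.mp hb with h | h
      · exact h
      · exact this b h
    rw [hrep]
    have hofrep : ∀ n, PySem.Set.ofList (List.replicate (n + 1) x) = [x] := by
      intro n
      induction n with
      | zero => rfl
      | succ m ih =>
        rw [List.replicate_succ' (n := m+1), PySem.Set.ofList_append_singleton, ih]
        simp [PySem.Set.add, PySem.Set.contains]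
    rw [hofrep]
    rfl

lemma pvTruncdiv_natCast (a b : ℕ) : PySem.Int.truncdiv (a : ℤ) (b : ℤ) = ((a / b : ℕ) : ℤ) := by
  simp [PySem.Int.truncdiv, Int.tdiv]

lemma pvTruncdiv_two (a : ℕ) : PySem.Int.truncdiv (a : ℤ) 2 = ((a / 2 : ℕ) : ℤ) := by
  exact_mod_cast pvTruncdiv_natCast a 2

lemma pvAllEq_iff (g : ℕ → List Char) (m : ℕ) (hm : 0 < m) :
    (∀ x ∈ (List.range m).map g, ∀ y ∈ (List.range m).map g, x = y) ↔ ∀ i, i < m → g i = g 0 := by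
  simp only [List.mem_map, List.mem_range]
  constructor
  · intro h i him
    exact h _ ⟨i, him, rfl⟩ _ ⟨0, hm, rfl⟩
  · rintro h x ⟨i, him, rfl⟩ y ⟨i', him', rfl⟩
    rw [h i him, h i' him']

-- the body of A's loop, at a divisor j = ↑jn of the length, succeeds iff l repeats with period jn
lemma pvCond_iff (s : List Char) (jn : ℕ) (hj0 : 0 < jn) (hdvd : jn ∣ s.length) (hL : 0 < s.length) :
    ((if PySem.Int.mod (s.length : ℤ) (jn : ℤ) ≠ 0 then false
      else
        ((PySem.List.pyRange 0 (PySem.Int.truncdiv (s.length : ℤ) (jn : ℤ)) 1).map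
          (fun i => PySem.List.slice s (some (i * (jn:ℤ))) (some ((i + 1) * (jn:ℤ))))
          |> PySem.Set.ofList).length == 1) = true)
      ↔ pvBase s jn := by
  set L := s.length with hLdef
  have hdZ : ((jn:ℤ)) ∣ ((L:ℤ)) := by exact_mod_cast hdvd
  rw [if_neg (by rw [Ne, PySem.Int.mod_eq_zero_iff_dvd]; simpa using hdZ)]
  rw [pvTruncdiv_natCast L jn]
  set m := L / jn with hm
  have hm0 : 0 < m := Nat.div_pos (Nat.le_of_dvd hL hdvd) hj0
  have hchunks : (PySem.List.pyRange 0 ((m:ℕ):ℤ) 1).map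
      (fun i => PySem.List.slice s (some (i * (jn:ℤ))) (some ((i + 1) * (jn:ℤ))))
      = (List.range m).map (fun i => (s.drop (i * jn)).take jn) := by
    rw [PySem.List.pyRange_zero_nat, List.map_map]
    apply List.map_congr_left
    intro i _
    simp only [Function.comp_apply]
    have e1 : ((i:ℤ)) * (jn:ℤ) = (((i * jn : ℕ)):ℤ) := by push_cast; ring
    have e2 : ((i:ℤ) + 1) * (jn:ℤ) = (((i * jn : ℕ)):ℤ) + ((jn:ℕ):ℤ) := by push_cast; ring
    rw [e1, e2, PySem.List.slice_natCast_add]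
  rw [hchunks, beq_iff_eq]
  have hne : (List.range m).map (fun i => (s.drop (i * jn)).take jn) ≠ [] := by
    simp [List.map_eq_nil_iff, List.range_eq_nil]; omega
  rw [pvSetLen_one_iff _ hne, pvAllEq_iff _ _ hm0]
  have hg0 : (s.drop (0 * jn)).take jn = s.take jn := by simp
  rw [← pvChunks_iff_base hj0 hdvd]
  constructor
  · intro h i hi; rw [h i hi, hg0]
  · intro h i hi; rw [h i hi, hg0]

lemma pvA_iff (n : Int) (hL : 0 < (PySem.Int.toChars n).length) :
    is_int_repeated n = true ↔
      ∃ j : ℕ, 0 < j ∧ j ∣ (PySem.Int.toChars n).length ∧ j ≤ (PySem.Int.toChars n).length / 2 ∧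
        pvBase (PySem.Int.toChars n) j := by
  set s := PySem.Int.toChars n with hs
  set L := s.length with hLdef
  show (PySem.List.pyRange 1 (PySem.Int.truncdiv (L : ℤ) 2 + 1) 1).any _ = true ↔ _
  rw [List.any_eq_true]
  constructor
  · rintro ⟨j, hjmem, hcond⟩
    rw [PySem.List.mem_pyRange_one, pvTruncdiv_two L] at hjmem
    obtain ⟨hj1, hj2⟩ := hjmem
    set jn := j.toNat with hjn
    have hj : j = (jn : ℤ) := by omega
    have hjle : jn ≤ L / 2 := by omega
    rw [hj] at hcond
    by_cases hdvd : jn ∣ L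
    · exact ⟨jn, by omega, hdvd, hjle, (pvCond_iff s jn (by omega) hdvd hL).mp hcond⟩
    · exfalso
      have : ¬ ((jn:ℤ) ∣ (L:ℤ)) := fun h => hdvd (by exact_mod_cast h)
      rw [if_pos (by rwa [Ne, PySem.Int.mod_eq_zero_iff_dvd])] at hcond
      exact absurd hcond (by simp)
  · rintro ⟨jn, hj0, hdvd, hjle, hbase⟩
    refine ⟨(jn : ℤ), ?_, (pvCond_iff s jn hj0 hdvd hL).mpr hbase⟩
    rw [PySem.List.mem_pyRange_one, pvTruncdiv_two L]
    constructor
    · exact_mod_cast hj0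
    · have : (jn : ℤ) ≤ ((L/2 : ℕ) : ℤ) := by exact_mod_cast hjle
      omega

lemma pvSlice_eq (s : List Char) (h : 0 < s.length) :
    PySem.List.slice (s ++ s) (some 1) (some (-1)) = ((s ++ s).drop 1).take (2 * s.length - 2) := by
  simp only [PySem.List.slice]
  have h1 : PySem.List.clampIdx (s ++ s).length 1 = 1 := by
    simp [PySem.List.clampIdx]; omega
  have h2 : PySem.List.clampIdx (s ++ s).length (-1) = 2 * s.length - 1 := by
    rw [PySem.List.clampIdx_neg_one]; simp [two_mul]
  rw [h1, h2]
  congr 1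

lemma pvPrefix_drop_iff_rotate (s : List Char) (k : ℕ) (hk : k ≤ s.length) :
    s <+: (s ++ s).drop k ↔ s.rotate k = s := by
  rw [List.drop_append, Nat.sub_eq_zero_of_le hk, List.drop_zero]
  rw [List.prefix_iff_eq_take, List.take_append]
  rw [List.length_drop, List.take_of_length_le (by rw [List.length_drop]; omega)]
  have e : s.length - (s.length - k) = k := by omega
  rw [e, ← List.rotate_eq_drop_append_take hk]
  exact ⟨fun h => h.symm, fun h => h.symm⟩

lemma pvB_iff (n : Int) (hL : 0 < (PySem.Int.toChars n).length) :
    is_int_repeated_alt n = true ↔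
      ∃ k : ℕ, 0 < k ∧ k < (PySem.Int.toChars n).length ∧
        (PySem.Int.toChars n).rotate k = PySem.Int.toChars n := by
  set s := PySem.Int.toChars n with hs
  set L := s.length with hLdef
  show PySem.Chars.isIn s (PySem.List.slice (s ++ s) (some 1) (some (-1))) = true ↔ _
  rw [← PySem.Chars.exists_prefix_drop_iff_isIn, pvSlice_eq s hL]
  constructor
  · rintro ⟨j, hj⟩
    rw [List.drop_take, List.drop_drop] at hj
    rw [List.prefix_take_iff] at hj
    obtain ⟨hpre, hlen⟩ := hj
    have hjL : j + 1 ≤ L - 1 := by simp [← hLdef] at hlen ⊢; omega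
    refine ⟨j + 1, by omega, by omega, ?_⟩
    rw [← pvPrefix_drop_iff_rotate s (j+1) (by omega), Nat.add_comm j 1]
    exact hpre
  · rintro ⟨k, hk0, hkL, hrot⟩
    refine ⟨k - 1, ?_⟩
    rw [List.drop_take, List.drop_drop, List.prefix_take_iff]
    have e : 1 + (k - 1) = k := by omega
    rw [e]
    constructor
    · exact (pvPrefix_drop_iff_rotate s k (by omega)).mpr hrot
    · simp [← hLdef]; omega

lemma pvToChars_ne_nil (n : Int) : PySem.Int.toChars n ≠ [] := by
  unfold PySem.Int.toChars
  split
  · simp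
  · have := @Nat.length_toDigits_pos 10 n.toNat
    intro h
    rw [h] at this
    simp at this

lemma pvBridge (l : List Char) (hL : 0 < l.length) :
    (∃ j : ℕ, 0 < j ∧ j ∣ l.length ∧ j ≤ l.length / 2 ∧ pvBase l j) ↔
      (∃ k : ℕ, 0 < k ∧ k < l.length ∧ l.rotate k = l) := by
  constructor
  · rintro ⟨j, hj0, hdvd, hle, hbase⟩
    refine ⟨j, hj0, ?_, pvRotate_iff_cyc.mpr (pvCyc_of_base hdvd hbase)⟩
    have : l.length / 2 < l.length := Nat.div_lt_self hL one_lt_two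
    omega
  · rintro ⟨k, hk0, hkL, hrot⟩
    have hcyc : pvCyc l k := pvRotate_iff_cyc.mp hrot
    set d := Nat.gcd k l.length with hd
    have hd0 : 0 < d := Nat.gcd_pos_of_pos_right _ hL
    have hddvd : d ∣ l.length := Nat.gcd_dvd_right _ _
    have hdk : d ≤ k := Nat.le_of_dvd hk0 (Nat.gcd_dvd_left _ _)
    have hdL : d < l.length := by omega
    have hcycd : pvCyc l d := by
      obtain ⟨u, hu⟩ := pvBezout k l.length hL
      have h1 : pvCyc l ((u * k) % l.length) := pvCyc_mod (pvCyc_mul hcyc u)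
      rwa [hu, Nat.mod_eq_of_lt hdL] at h1
    have hbase : pvBase l d := pvBase_of_lin hd0 (pvLin_of_cyc hcycd)
    refine ⟨d, hd0, hddvd, ?_, hbase⟩
    obtain ⟨m, hm⟩ := hddvd
    have hm2 : 2 ≤ m := by
      rcases Nat.lt_or_ge m 2 with h | h
      · interval_cases m <;> omega
      · exact h
    rw [Nat.le_div_iff_mul_le (by omega)]
    calc d * 2 ≤ d * m := Nat.mul_le_mul_left _ hm2
    _ = l.length := hm.symm

-- ===== VERDICT (by name: the statement is the Claim_ definition above) =====
theorem is_int_repeated_spec : Claim_equal_is_int_repeated := by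
  intro n _
  unfold Spec_is_int_repeated
  have hL : 0 < (PySem.Int.toChars n).length :=
    List.length_pos_iff.mpr (pvToChars_ne_nil n)
  rw [Bool.eq_iff_iff, pvA_iff n hL, pvB_iff n hL]
  exact pvBridge _ hL
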